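-- pv_equiv track=rewrite | github.com/ekoshv/Portfolio_Optim | ekoptim/main.py | reshape_nm
-- ===== SOURCE A (Python) =====
-- def reshape_nm(L):
--
--     # Find the factors of L
--     factors = [i for i in range(1, L+1) if L % i == 0]
--
--     # Find the factor pair closest to a square shape
--     mid = len(factors) // 2
--     if len(factors) % 2 == 0:
--         m, n = factors[mid-1], factors[mid]
--     else:
--         m = n = factors[mid]
--
--     return n, m
-- ===== SOURCE B (Python) =====
-- def reshape_nm(L):
--     # Largest divisor m with m*m <= L; pair is (L//m, m).  O(sqrt(L)) vs A's O(L).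
--     m = 1
--     d = 1
--     while d * d <= L:
--         if L % d == 0:
--             m = d
--         d += 1
--     return L // m, m
-- ===== Notes on version B (the rewrite author's own statement) =====
-- stated objective: faster
-- what changed: A enumerates all L candidate divisors and indexes the middle of the resulting list; B scans d = 1..floor(sqrt(L)) once, keeping the last divisor m, and returns (L//m, m).
-- outside the precondition, e.g. on reshape_nm(0): A raises IndexError, B returns (0, 1)
import Mathlib
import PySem

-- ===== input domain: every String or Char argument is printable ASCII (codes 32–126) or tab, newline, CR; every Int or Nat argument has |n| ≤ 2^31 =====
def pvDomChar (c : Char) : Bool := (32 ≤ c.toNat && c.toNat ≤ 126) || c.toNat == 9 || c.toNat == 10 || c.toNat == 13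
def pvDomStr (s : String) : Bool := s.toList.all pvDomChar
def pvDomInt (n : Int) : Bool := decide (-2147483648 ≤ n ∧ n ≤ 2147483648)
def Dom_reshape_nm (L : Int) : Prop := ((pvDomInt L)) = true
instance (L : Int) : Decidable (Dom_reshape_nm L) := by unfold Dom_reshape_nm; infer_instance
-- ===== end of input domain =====

-- B replaces A's O(L) enumeration of all divisors by a single O(√L) scan keeping the
-- largest divisor d with d*d ≤ L; objective: faster (asymptotic).

-- ===== PORT A =====
-- A's list comprehension: [i for i in range(1, L+1) if L % i == 0]
def divList (L : Int) : List Int :=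
  (PySem.List.pyRange 1 (L + 1) 1).filter (fun i => PySem.Int.mod L i == 0)

def reshape_nm (L : Int) : Int × Int :=
  let factors := divList L
  let mid : Int := PySem.Int.floordiv (factors.length : Int) 2
  if PySem.Int.mod (factors.length : Int) 2 == 0 then
    match PySem.List.pyGet? factors (mid - 1), PySem.List.pyGet? factors mid with
    | some m, some n => (n, m)
    | _, _ => (0, 0)  -- IndexError (empty factors, L ≤ 0); outside Pre_
  else
    match PySem.List.pyGet? factors mid with
    | some m => (m, m)
    | none => (0, 0)  -- unreachable

-- ===== PORT B =====
-- the while-loop of Source B: d counts up while d*d ≤ L, m remembers the last divisor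
-- (the '1 ≤ d' conjunct only makes the recursion well-founded; Source B always starts at d = 1)
def bLoop (L d m : Int) : Int :=
  if h : d * d ≤ L ∧ 1 ≤ d then
    bLoop L (d + 1) (if PySem.Int.mod L d == 0 then d else m)
  else m
termination_by (L + 1 - d).toNat
decreasing_by
  have hd : d ≤ d * d := le_mul_of_one_le_left (by omega) h.2
  omega

def reshape_nm_alt (L : Int) : Int × Int :=
  let m := bLoop L 1 1
  (PySem.Int.floordiv L m, m)

-- ===== PRECONDITION & SPEC =====
-- Pre_ excludes L ≤ 0: there the factor list is empty and A raises IndexError.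
def Pre_reshape_nm (L : Int) : Prop := 1 ≤ L
instance (L : Int) : Decidable (Pre_reshape_nm L) := by unfold Pre_reshape_nm; infer_instance
def pvWitness_reshape_nm : Int := (12)

def Spec_reshape_nm (L : Int) (out : Int × Int) : Prop := out = reshape_nm_alt L
instance (L : Int) (out : Int × Int) : Decidable (Spec_reshape_nm L out) := by unfold Spec_reshape_nm; infer_instance

-- ===== CLAIM (what is proved, stated in full; the proofs are below) =====
def Claim_equal_reshape_nm : Prop := ∀ (L : Int), Dom_reshape_nm L → Pre_reshape_nm L → Spec_reshape_nm L (reshape_nm L)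

-- ===== LEMMAS AND PROOFS =====

-- "m is the largest divisor of L whose square is ≤ L"
def IsMStar (L m : Int) : Prop :=
  m ∣ L ∧ 1 ≤ m ∧ m * m ≤ L ∧ ∀ e, e ∣ L → 1 ≤ e → e * e ≤ L → e ≤ m

theorem isMStar_unique {L m₁ m₂ : Int} (h₁ : IsMStar L m₁) (h₂ : IsMStar L m₂) : m₁ = m₂ :=
  le_antisymm (h₂.2.2.2 m₁ h₁.1 h₁.2.1 h₁.2.2.1) (h₁.2.2.2 m₂ h₂.1 h₂.2.1 h₂.2.2.1)

theorem mem_divList {L x : Int} (hL : 1 ≤ L) : x ∈ divList L ↔ 1 ≤ x ∧ x ∣ L := by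
  unfold divList
  rw [List.mem_filter]
  rw [PySem.List.mem_pyRange_one]
  constructor
  · rintro ⟨⟨h1, h2⟩, h3⟩
    refine ⟨h1, ?_⟩
    have := (PySem.Int.mod_eq_zero_iff_dvd L x).1 (by simpa using h3)
    exact this
  · rintro ⟨h1, h2⟩
    have hx : x ≤ L := Int.le_of_dvd (by omega) h2
    refine ⟨⟨h1, by omega⟩, ?_⟩
    simpa using (PySem.Int.mod_eq_zero_iff_dvd L x).2 h2

theorem divList_pairwise (L : Int) : (divList L).Pairwise (· < ·) := by
  exact (PySem.List.pairwise_lt_pyRange_one 1 (L + 1)).filter _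

theorem div_facts {L x : Int} (hL : 1 ≤ L) (hx1 : 1 ≤ x) (hd : x ∣ L) :
    1 ≤ L / x ∧ (L / x) ∣ L ∧ L / (L / x) = x ∧ L / x * x = L := by
  obtain ⟨c, hc⟩ := hd
  have hx0 : x ≠ 0 := by omega
  have hcx : L / x = c := by rw [hc]; exact Int.mul_ediv_cancel_left c hx0
  have hc1 : 1 ≤ c := by nlinarith
  have hc0 : c ≠ 0 := by omega
  refine ⟨by omega, ⟨x, by rw [hcx, hc]; ring⟩, ?_, by rw [hcx]; nlinarith⟩
  rw [hcx, hc]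
  exact Int.mul_ediv_cancel x hc0

theorem div_antitone {L a b : Int} (hL : 1 ≤ L) (ha1 : 1 ≤ a) (had : a ∣ L)
    (hb1 : 1 ≤ b) (hbd : b ∣ L) (hab : a < b) : L / b < L / a := by
  obtain ⟨hp1, -, -, hp⟩ := div_facts hL ha1 had
  obtain ⟨hq1, -, -, hq⟩ := div_facts hL hb1 hbd
  nlinarith

theorem divList_map_reverse {L : Int} (hL : 1 ≤ L) :
    (divList L).map (fun d => L / d) = (divList L).reverse := by
  have hnd : (divList L).Nodup := (divList_pairwise L).imp (fun h => ne_of_lt h)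
  have hmemf : ∀ x ∈ divList L, (L / x) ∈ divList L ∧ L / (L / x) = x := by
    intro x hx
    obtain ⟨hx1, hxd⟩ := (mem_divList hL).1 hx
    obtain ⟨h1, h2, h3, -⟩ := div_facts hL hx1 hxd
    exact ⟨(mem_divList hL).2 ⟨h1, h2⟩, h3⟩
  have hndm : ((divList L).map (fun d => L / d)).Nodup := by
    refine List.Nodup.map_on ?_ hnd
    intro x hx y hy hxy
    have := (hmemf x hx).2
    rw [hxy, (hmemf y hy).2] at this
    omega
  have hperm : ((divList L).map (fun d => L / d)).Perm ((divList L).reverse) := by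
    rw [List.perm_ext_iff_of_nodup hndm (List.nodup_reverse.2 hnd)]
    intro y
    rw [List.mem_reverse, List.mem_map]
    constructor
    · rintro ⟨x, hx, rfl⟩
      exact (hmemf x hx).1
    · intro hy
      exact ⟨L / y, (hmemf y hy).1, (hmemf y hy).2⟩
  refine hperm.eq_of_pairwise (le := fun a b => b < a) ?_ ?_ ?_
  · intro a b _ _ h1 h2; omega
  · rw [List.pairwise_map]
    refine List.Pairwise.imp_of_mem ?_ (divList_pairwise L)
    intro a b ha hb hab
    obtain ⟨ha1, had⟩ := (mem_divList hL).1 ha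
    obtain ⟨hb1, hbd⟩ := (mem_divList hL).1 hb
    exact div_antitone hL ha1 had hb1 hbd hab
  · rw [List.pairwise_reverse]
    exact divList_pairwise L

theorem divList_prod {L : Int} (hL : 1 ≤ L) {i : Nat} (h : i < (divList L).length) :
    (divList L)[i] * (divList L)[(divList L).length - 1 - i]'(by omega) = L := by
  have h1 := divList_map_reverse hL
  have h2 := List.getElem_of_eq h1 (by simpa using h)
  rw [List.getElem_map, List.getElem_reverse] at h2
  obtain ⟨hx1, hxd⟩ := (mem_divList hL).1 (List.getElem_mem h)
  obtain ⟨-, -, -, hp⟩ := div_facts hL hx1 hxd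
  rw [← h2, mul_comm]
  exact hp

theorem bLoop_spec {L : Int} (d m : Int) :
    1 ≤ d → m ∣ L → 1 ≤ m → m * m ≤ L → m ≤ d →
      (bLoop L d m ∣ L ∧ 1 ≤ bLoop L d m ∧ bLoop L d m * bLoop L d m ≤ L) ∧
      (∀ e, e ∣ L → d ≤ e → e * e ≤ L → e ≤ bLoop L d m) ∧ m ≤ bLoop L d m := by
  fun_induction bLoop L d m with
  | case1 d m h ih =>
    intro hd hmd hm1 hmm hmdle
    by_cases hdvd : PySem.Int.mod L d == 0
    · have hddvd : d ∣ L := by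
        have := (PySem.Int.mod_eq_zero_iff_dvd L d).1 (by simpa using hdvd)
        exact this
      simp [hdvd] at ih ⊢
      obtain ⟨hprops, hmax, hle⟩ := ih (by omega) hddvd hd h.1
      refine ⟨hprops, ?_, by omega⟩
      intro e he hde hee
      rcases eq_or_lt_of_le hde with heq | hlt
      · omega
      · exact hmax e he (by omega) hee
    · have hndvd : ¬ d ∣ L := by
        intro hc
        exact (by simpa using hdvd : ¬ PySem.Int.mod L d = 0)
          ((PySem.Int.mod_eq_zero_iff_dvd L d).2 hc)
      simp [hdvd] at ih ⊢
      obtain ⟨hprops, hmax, hle⟩ := ih (by omega) hmd hm1 hmm (by omega)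
      refine ⟨hprops, ?_, hle⟩
      intro e he hde hee
      rcases eq_or_lt_of_le hde with heq | hlt
      · exact absurd (heq ▸ he) hndvd
      · exact hmax e he (by omega) hee
  | case2 d m h =>
    intro hd hmd hm1 hmm hmdle
    refine ⟨⟨hmd, hm1, hmm⟩, ?_, le_refl m⟩
    intro e he hde hee
    have : ¬ d * d ≤ L := by tauto
    nlinarith

theorem bLoop_isMStar {L : Int} (hL : 1 ≤ L) : IsMStar L (bLoop L 1 1) := by
  obtain ⟨⟨h1, h2, h3⟩, hmax, -⟩ :=
    bLoop_spec 1 1 (le_refl 1) (one_dvd L) (le_refl 1) (by omega) (le_refl 1)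
  exact ⟨h1, h2, h3, fun e he h1e hee => hmax e he h1e hee⟩

theorem alt_eq {L : Int} (hL : 1 ≤ L) {m : Int} (hm : IsMStar L m) :
    reshape_nm_alt L = (L / m, m) := by
  have hb := bLoop_isMStar hL
  have heq : bLoop L 1 1 = m := isMStar_unique hb hm
  have hm1 : 1 ≤ m := hm.2.1
  show (PySem.Int.floordiv L (bLoop L 1 1), bLoop L 1 1) = (L / m, m)
  rw [heq, PySem.Int.floordiv_eq_ediv_of_pos (by omega : (0:Int) < m)]

theorem a_eq {L : Int} (hL : 1 ≤ L) {m : Int} (hm : IsMStar L m) :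
    reshape_nm L = (L / m, m) := by
  have h1F : (1:Int) ∈ divList L := (mem_divList hL).2 ⟨le_refl 1, one_dvd L⟩
  have hk1 : 1 ≤ (divList L).length := List.length_pos_of_mem h1F
  have hpw := divList_pairwise L
  have hmono : ∀ i j (hi : i < (divList L).length) (hj : j < (divList L).length),
      i < j → (divList L)[i] < (divList L)[j] :=
    fun i j hi hj hij => List.pairwise_iff_getElem.1 hpw i j hi hj hij
  have hmid : PySem.Int.floordiv ((divList L).length : Int) 2 =
      (((divList L).length / 2 : Nat) : Int) := by
    rw [PySem.Int.floordiv_eq_ediv_of_pos (by norm_num : (0:Int) < 2)]; omega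
  set k := (divList L).length with hk
  have hEj : ∀ {j₁ j₂ : Nat} (h₁ : j₁ < k) (h₂ : j₂ < k), j₁ ≤ j₂ →
      (divList L)[j₁]'h₁ ≤ (divList L)[j₂]'h₂ := by
    intro j₁ j₂ h₁ h₂ hle
    rcases Nat.eq_or_lt_of_le hle with rfl | hlt
    · exact le_refl _
    · exact le_of_lt (hmono _ _ h₁ h₂ hlt)
  by_cases hpar : k % 2 = 0
  · -- even number of divisors
    have hk2 : 2 ≤ k := by omega
    have hi : k / 2 - 1 < k := by omega
    have hj : k / 2 < k := by omega
    have hcond : (PySem.Int.mod (k : Int) 2 == 0) = true := by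
      rw [PySem.Int.mod_eq_emod_of_pos (by norm_num : (0:Int) < 2)]
      simp only [beq_iff_eq]
      omega
    have hget1 : PySem.List.pyGet? (divList L) (PySem.Int.floordiv (k : Int) 2 - 1) =
        some ((divList L)[k / 2 - 1]'hi) := by
      rw [hmid, show (((k / 2 : Nat) : Int) - 1) = ((k / 2 - 1 : Nat) : Int) by omega,
        PySem.List.pyGet?_natCast]
      exact List.getElem?_eq_getElem hi
    have hget2 : PySem.List.pyGet? (divList L) (PySem.Int.floordiv (k : Int) 2) =
        some ((divList L)[k / 2]'hj) := by
      rw [hmid, PySem.List.pyGet?_natCast]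
      exact List.getElem?_eq_getElem hj
    have hprod : (divList L)[k / 2 - 1]'hi * (divList L)[k / 2]'hj = L := by
      have h := divList_prod hL (i := k / 2 - 1) (by omega)
      simpa [show (divList L).length - 1 - (k / 2 - 1) = k / 2 from by omega] using h
    obtain ⟨hi1, hid⟩ := (mem_divList hL).1 (List.getElem_mem hi)
    obtain ⟨hj1, hjd⟩ := (mem_divList hL).1 (List.getElem_mem hj)
    have hlt : (divList L)[k / 2 - 1]'hi < (divList L)[k / 2]'hj :=
      hmono _ _ hi hj (by omega)
    have hstar : IsMStar L ((divList L)[k / 2 - 1]'hi) := by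
      refine ⟨hid, hi1, by nlinarith, ?_⟩
      intro e he h1e hee
      have heF : e ∈ divList L := (mem_divList hL).2 ⟨h1e, he⟩
      obtain ⟨j', hj', hej⟩ := List.mem_iff_getElem.1 heF
      by_cases hcase : j' ≤ k / 2 - 1
      · have := hEj hj' hi hcase
        omega
      · have hge := hEj hj hj' (show k / 2 ≤ j' by omega)
        nlinarith [hge, hlt, hprod, hee, hi1, hj1, h1e]
    have hmeq : m = (divList L)[k / 2 - 1]'hi := isMStar_unique hm hstar
    have hdiv : L / m = (divList L)[k / 2]'hj := by
      rw [hmeq]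
      exact Int.ediv_eq_of_eq_mul_left (by omega) (by rw [mul_comm]; exact hprod.symm)
    simp only [reshape_nm]
    rw [← hk, if_pos hcond, hget1, hget2, hdiv, hmeq]
  · -- odd number of divisors (L is a perfect square)
    have hj : k / 2 < k := by omega
    have hcond : (PySem.Int.mod (k : Int) 2 == 0) = false := by
      rw [PySem.Int.mod_eq_emod_of_pos (by norm_num : (0:Int) < 2)]
      simp only [beq_eq_false_iff_ne, ne_eq]
      omega
    have hget : PySem.List.pyGet? (divList L) (PySem.Int.floordiv (k : Int) 2) =
        some ((divList L)[k / 2]'hj) := by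
      rw [hmid, PySem.List.pyGet?_natCast]
      exact List.getElem?_eq_getElem hj
    have hprod : (divList L)[k / 2]'hj * (divList L)[k / 2]'hj = L := by
      have h := divList_prod hL (i := k / 2) (by omega)
      simpa [show (divList L).length - 1 - k / 2 = k / 2 from by omega] using h
    obtain ⟨hj1, hjd⟩ := (mem_divList hL).1 (List.getElem_mem hj)
    have hstar : IsMStar L ((divList L)[k / 2]'hj) := by
      refine ⟨hjd, hj1, by omega, ?_⟩
      intro e he h1e hee
      have heF : e ∈ divList L := (mem_divList hL).2 ⟨h1e, he⟩
      obtain ⟨j', hj', hej⟩ := List.mem_iff_getElem.1 heF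
      by_cases hcase : j' ≤ k / 2
      · have := hEj hj' hj hcase
        omega
      · have hge := hEj hj hj' (show k / 2 ≤ j' by omega)
        nlinarith [hge, hprod, hee, hj1, h1e]
    have hmeq : m = (divList L)[k / 2]'hj := isMStar_unique hm hstar
    have hdiv : L / m = (divList L)[k / 2]'hj := by
      rw [hmeq]
      exact Int.ediv_eq_of_eq_mul_left (by omega) hprod.symm
    simp only [reshape_nm]
    rw [← hk, if_neg (by rw [hcond]; simp), hget, hdiv, hmeq]

theorem mStar_exists {L : Int} (hL : 1 ≤ L) : ∃ m, IsMStar L m :=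
  ⟨bLoop L 1 1, bLoop_isMStar hL⟩

-- ===== VERDICT (by name: the statement is the Claim_ definition above) =====
theorem reshape_nm_spec : Claim_equal_reshape_nm := by
  intro L _ hPre
  obtain ⟨m, hm⟩ := mStar_exists hPre
  unfold Spec_reshape_nm
  rw [a_eq hPre hm, alt_eq hPre hm]
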